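-- pv_equiv track=rewrite | github.com/jsantiagopatte/advent_of_code_2025 | day_5.py | split_ranges_food
-- ===== SOURCE A (Python) =====
-- def split_ranges_food(data):
--     ranges = []
--     food_ids = []
--     current = "ranges"
--     for item in data:
--         if item == '':
--             current = "food"
--             continue
--         if current == "ranges":
--             ranges.append(item)
--         else:
--             food_ids.append(item)
--
--     return ranges, food_ids
-- ===== SOURCE B (Python) =====
-- def split_ranges_food(data):
--     data = list(data)
--     if '' not in data:
--         return data, []
--     i = data.index('')
--     return data[:i], [x for x in data[i + 1:] if x != '']
-- ===== Notes on version B (the rewrite author's own statement) =====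
-- stated objective: simpler
-- what changed: Replaces the running state-flag loop by computing the first blank line's index and slicing: prefix is the ranges, the food section is the filtered remainder.
import Mathlib
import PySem

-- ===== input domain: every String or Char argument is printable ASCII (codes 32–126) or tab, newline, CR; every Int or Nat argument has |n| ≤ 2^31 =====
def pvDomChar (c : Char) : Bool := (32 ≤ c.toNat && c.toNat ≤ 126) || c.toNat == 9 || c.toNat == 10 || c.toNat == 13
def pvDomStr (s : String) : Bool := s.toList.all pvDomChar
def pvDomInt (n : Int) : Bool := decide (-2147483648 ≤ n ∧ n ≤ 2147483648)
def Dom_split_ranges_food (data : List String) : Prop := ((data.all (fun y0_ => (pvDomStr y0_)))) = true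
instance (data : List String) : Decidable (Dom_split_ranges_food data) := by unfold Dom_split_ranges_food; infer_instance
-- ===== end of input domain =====

-- B replaces A's running state-flag loop by an index-and-slice decomposition (objective: simpler).


-- ===== PORT A =====
-- loop state: (ranges, food_ids, current)
def pvStepA (st : List String × List String × String) (item : String) :
    List String × List String × String :=
  if item = "" then (st.1, st.2.1, "food")
  else if st.2.2 = "ranges" then (st.1 ++ [item], st.2.1, st.2.2)
  else (st.1, st.2.1 ++ [item], st.2.2)

def split_ranges_food (data : List String) : List String × List String :=
  let s := data.foldl pvStepA ([], [], "ranges")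
  (s.1, s.2.1)

-- ===== PORT B =====
def split_ranges_food_alt (data : List String) : List String × List String :=
  match PySem.List.index? data "" with
  | none => (data, [])
  | some i =>
      (PySem.List.slice data none (some (i : Int)),
       (PySem.List.slice data (some ((i : Int) + 1)) none).filter (fun x => x ≠ ""))

-- ===== PRECONDITION & SPEC =====
def Spec_split_ranges_food (data : List String) (out : List String × List String) : Prop := out = split_ranges_food_alt data
instance (data : List String) (out : List String × List String) : Decidable (Spec_split_ranges_food data out) := by unfold Spec_split_ranges_food; infer_instance

-- ===== CLAIM (what is proved, stated in full; the proofs are below) =====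
def Claim_equal_split_ranges_food : Prop := ∀ (data : List String), Dom_split_ranges_food data → Spec_split_ranges_food data (split_ranges_food data)

-- ===== LEMMAS AND PROOFS =====

-- once the flag is "food", every non-blank item is appended to food_ids
theorem foldA_food (xs : List String) (r f : List String) :
    xs.foldl pvStepA (r, f, "food") = (r, f ++ xs.filter (fun x => x ≠ ""), "food") := by
  induction xs generalizing f with
  | nil => simp
  | cons x xs ih =>
      by_cases hx : x = ""
      · subst hx; simp [pvStepA, ih]
      · simp [List.foldl_cons, pvStepA, hx, ih]

-- in "ranges" mode the fold is characterised by the first blank's index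
theorem foldA_ranges (xs : List String) (r f : List String) :
    (fun s => (s.1, s.2.1)) (xs.foldl pvStepA (r, f, "ranges")) =
      match PySem.List.index? xs "" with
      | none => (r ++ xs, f)
      | some i => (r ++ xs.take i, f ++ (xs.drop (i + 1)).filter (fun x => x ≠ "")) := by
  induction xs generalizing r with
  | nil => simp
  | cons x xs ih =>
      by_cases hx : x = ""
      · subst hx
        rw [PySem.List.index?_cons_self]
        simp [List.foldl_cons, pvStepA, foldA_food]
      · rw [show PySem.List.index? (x :: xs) "" = (PySem.List.index? xs "").map (· + 1) from
          PySem.List.index?_cons_of_ne _ hx]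
        have : (x :: xs).foldl pvStepA (r, f, "ranges")
            = xs.foldl pvStepA (r ++ [x], f, "ranges") := by
          simp [List.foldl_cons, pvStepA, hx]
        rw [this, ih]
        cases h : PySem.List.index? xs "" with
        | none => simp
        | some i => simp [List.take_succ_cons, List.drop_succ_cons]

-- ===== VERDICT (by name: the statement is the Claim_ definition above) =====
theorem split_ranges_food_spec : Claim_equal_split_ranges_food := by
  intro data _
  unfold Spec_split_ranges_food split_ranges_food split_ranges_food_alt
  have h := foldA_ranges data [] []
  cases hidx : PySem.List.index? data "" with
  | none => rw [hidx] at h; simpa using h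
  | some i =>
      rw [hidx] at h
      simp only [List.nil_append] at h
      simp only [h]
      rw [PySem.List.slice_to_natCast]
      have : ((i : Int) + 1) = ((i + 1 : Nat) : Int) := by push_cast; ring
      rw [this, PySem.List.slice_from_natCast]
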